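-- pv_equiv track=rewrite | github.com/mmisak/counTR | counTR.py | interpret_alignment
-- ===== SOURCE A (Python) =====
-- def interpret_alignment(alignment_repeat_in_read, alignment_optimal_repeat, repeat_unit_offset, repeat_unit, start_in_read, end_in_read):
--         """Extracts positional information of repeat imperfections and repeat unit offset from the alignment to the ideal repeat provided by Phobos output"""
--         repeat_imperfections = [] #sequence variants in observed repeats in relation to optimal repeat
--         insertion_offset_counter = 0
--         deletion_offset_counter = 0
--         current_insertion = ""
--         current_deletion = ""
--         for i in range(len(alignment_optimal_repeat)):
--                 if alignment_optimal_repeat[i] == "-":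
--                         current_insertion += alignment_repeat_in_read[i]
--                         insertion_offset_counter += 1
--                 elif alignment_repeat_in_read[i] == "-":
--                         current_deletion +=  alignment_optimal_repeat[i]
--                         deletion_offset_counter += 1
--                 else: #if match or mismatch, note: indel conditions do not need to be run again after loop is done because last nucleotide in alignment is never an indel
--                         if (current_insertion != ""):
--                                 ins_flank_end_repeat = (i + 1) - insertion_offset_counter
--                                 ins_flank_start_repeat =  ins_flank_end_repeat - 1
--                                 ins_flank_end_repeat_unit = (ins_flank_end_repeat + repeat_unit_offset - 1)%len(repeat_unit) + 1 #not sure about +1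
--                                 ins_flank_start_repeat_unit = (ins_flank_start_repeat + repeat_unit_offset - 1)%len(repeat_unit) + 1 #not sure about +1
--                                 ins_end_in_read_repeat = i - deletion_offset_counter + (start_in_read -1)
--                                 ins_start_in_read_repeat = ins_end_in_read_repeat - len(current_insertion) + 1
--                                 repeat_imperfections.append("["  + str(ins_flank_start_repeat_unit) + "_" + str(ins_flank_end_repeat_unit) + "ins" + current_insertion + "," +
--                                                             str(ins_flank_start_repeat) + "_" + str(ins_flank_end_repeat) + "ins" + current_insertion + "," +
--                                                             str(ins_start_in_read_repeat) + "_" + str(ins_end_in_read_repeat) +  "del" + current_insertion + "]")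
--                                 current_insertion = ""
--                         if (current_deletion != ""):
--                                 del_flank_end_in_read_repeat = (i + 1) - deletion_offset_counter + (start_in_read -1)
--                                 del_flank_start_in_read_repeat = del_flank_end_in_read_repeat - 1
--                                 del_end_repeat = i - insertion_offset_counter
--                                 del_start_repeat = del_end_repeat - (len(current_deletion)) + 1
--                                 del_end_repeat_unit = (del_end_repeat + repeat_unit_offset - 1)%len(repeat_unit) + 1
--                                 del_start_repeat_unit = (del_start_repeat + repeat_unit_offset - 1)%len(repeat_unit) + 1
--
--                                 repeat_imperfections.append("["  + str(del_start_repeat_unit) + "_" + str(del_end_repeat_unit) + "del" + current_deletion + "," +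
--                                                             str(del_start_repeat) + "_" + str(del_end_repeat) + "del" + current_deletion + "," +
--                                                             str(del_flank_start_in_read_repeat) + "_" + str(del_flank_end_in_read_repeat) + "ins" + current_deletion + "]")
--                                 current_deletion = ""
--                         if alignment_repeat_in_read[i] != alignment_optimal_repeat[i]:
--                                 mismatch_pos_repeat_unit = (i - insertion_offset_counter + repeat_unit_offset )%len(repeat_unit) + 1
--                                 mismatch_pos_repeat = (i + 1) - insertion_offset_counter
--                                 mismatch_pos_read_repeat = i + start_in_read - deletion_offset_counter
--                                 repeat_imperfections.append("["  + str(mismatch_pos_repeat_unit) + alignment_optimal_repeat[i] + ">" + alignment_repeat_in_read[i] + "," +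
--                                                                 str(mismatch_pos_repeat) + alignment_optimal_repeat[i] + ">" + alignment_repeat_in_read[i] +"," +
--                                                                 str(mismatch_pos_read_repeat) + alignment_repeat_in_read[i] + ">" + alignment_optimal_repeat[i] + "]")
--         return(repeat_imperfections)
-- ===== SOURCE B (Python) =====
-- def interpret_alignment(alignment_repeat_in_read, alignment_optimal_repeat, repeat_unit_offset, repeat_unit, start_in_read, end_in_read):
--     """Two-phase reimplementation: first tabulate prefix counts of insertion and
--     deletion columns; then loop over the match/mismatch columns only, reading the
--     cumulative indel offsets from the tables and rebuilding each pending indel string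
--     from the gap since the previous match column, assembling records with a generic
--     join-based formatter (no running counters or pending-string accumulators)."""
--     r = alignment_repeat_in_read
--     o = alignment_optimal_repeat
--     u = len(repeat_unit)
--
--     ib = [0]
--     db = [0]
--     for j in range(len(o)):
--         ib.append(ib[-1] + (1 if o[j] == "-" else 0))
--         db.append(db[-1] + (1 if o[j] != "-" and r[j] == "-" else 0))
--
--     def unitpos(p):
--         return (p + repeat_unit_offset - 1) % u + 1
--
--     def rng(a, b):
--         return str(a) + "_" + str(b)
--
--     def rec(fields):
--         return "[" + ",".join(fields) + "]"
--
--     records = []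
--     prev = -1
--     for i in [k for k in range(len(o)) if o[k] != "-" and r[k] != "-"]:
--         I = ib[i]
--         D = db[i]
--         ins = "".join(r[j] for j in range(prev + 1, i) if o[j] == "-")
--         dele = "".join(o[j] for j in range(prev + 1, i) if o[j] != "-" and r[j] == "-")
--         if ins:
--             fe = i + 1 - I
--             re_ = i - D + start_in_read - 1
--             records.append(rec([rng(unitpos(fe - 1), unitpos(fe)) + "ins" + ins,
--                                 rng(fe - 1, fe) + "ins" + ins,
--                                 rng(re_ - len(ins) + 1, re_) + "del" + ins]))
--         if dele:
--             de = i - I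
--             ds = de - len(dele) + 1
--             fre = i - D + start_in_read
--             records.append(rec([rng(unitpos(ds), unitpos(de)) + "del" + dele,
--                                 rng(ds, de) + "del" + dele,
--                                 rng(fre - 1, fre) + "ins" + dele]))
--         if r[i] != o[i]:
--             mp = i + 1 - I
--             records.append(rec([str(unitpos(mp)) + o[i] + ">" + r[i],
--                                 str(mp) + o[i] + ">" + r[i],
--                                 str(i + start_in_read - D) + r[i] + ">" + o[i]]))
--         prev = i
--     return records
-- ===== Notes on version B (the rewrite author's own statement) =====
-- stated objective: alternative
-- what changed: B replaces A's single stateful column loop (per-column branch with running insertion/deletion counters and pending-string accumulators reset at match columns) by a two-phase pass: it first tabulates prefix counts of insertion/deletion columns, then loops over the match/mismatch columns only, reading cumulative indel offsets from the tables and rebuilding each pending indel string from the gap since the previous match column, assembling records with generic unitpos/rng/join helpers; Pre_ excludes inputs where A raises (optimal string longer than the read string: IndexError; …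
-- outside the precondition, e.g. on interpret_alignment('', '', 0, '', 0, 0): A returns [], B returns []
import Mathlib
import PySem

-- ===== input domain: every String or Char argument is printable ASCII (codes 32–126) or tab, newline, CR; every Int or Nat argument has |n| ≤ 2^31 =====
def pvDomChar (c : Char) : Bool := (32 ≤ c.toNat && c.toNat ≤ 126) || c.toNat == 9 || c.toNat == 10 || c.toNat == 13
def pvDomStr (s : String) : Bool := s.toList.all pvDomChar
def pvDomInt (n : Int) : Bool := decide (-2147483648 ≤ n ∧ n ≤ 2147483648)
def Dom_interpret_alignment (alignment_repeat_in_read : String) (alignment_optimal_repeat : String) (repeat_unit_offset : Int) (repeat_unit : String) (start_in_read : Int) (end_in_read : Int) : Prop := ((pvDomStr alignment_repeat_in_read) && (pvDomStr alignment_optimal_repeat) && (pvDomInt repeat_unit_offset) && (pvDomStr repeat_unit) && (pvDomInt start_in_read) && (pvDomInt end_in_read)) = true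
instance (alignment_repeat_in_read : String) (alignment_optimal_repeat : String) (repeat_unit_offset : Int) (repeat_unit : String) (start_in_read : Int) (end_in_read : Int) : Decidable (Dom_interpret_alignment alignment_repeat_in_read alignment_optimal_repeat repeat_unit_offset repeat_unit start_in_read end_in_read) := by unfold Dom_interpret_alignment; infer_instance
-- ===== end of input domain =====

-- B loops over the match/mismatch columns only, recomputing the cumulative indel offsets
-- from prefix counts and the pending indel strings from the gap since the previous match
-- column, and formats records with a generic join-based helper (objective: alternative
-- decomposition; same return value, no mutation of arguments).

-- ===== PORT A =====
-- A's per-iteration record strings (string '+' chains ported as List Char append, exact).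
def pvARecIns (u off s i insC delC : Int) (cur : List Char) : String :=
  let fe := (i + 1) - insC
  let fs := fe - 1
  let feU := PySem.Int.mod (fe + off - 1) u + 1
  let fsU := PySem.Int.mod (fs + off - 1) u + 1
  let re := i - delC + (s - 1)
  let rs := re - (cur.length : Int) + 1
  String.ofList (['['] ++ PySem.Int.toChars fsU ++ ['_'] ++ PySem.Int.toChars feU ++ ['i','n','s'] ++ cur
    ++ [','] ++ PySem.Int.toChars fs ++ ['_'] ++ PySem.Int.toChars fe ++ ['i','n','s'] ++ cur
    ++ [','] ++ PySem.Int.toChars rs ++ ['_'] ++ PySem.Int.toChars re ++ ['d','e','l'] ++ cur ++ [']'])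

def pvARecDel (u off s i insC delC : Int) (cur : List Char) : String :=
  let fre := (i + 1) - delC + (s - 1)
  let frs := fre - 1
  let de := i - insC
  let ds := de - (cur.length : Int) + 1
  let deU := PySem.Int.mod (de + off - 1) u + 1
  let dsU := PySem.Int.mod (ds + off - 1) u + 1
  String.ofList (['['] ++ PySem.Int.toChars dsU ++ ['_'] ++ PySem.Int.toChars deU ++ ['d','e','l'] ++ cur
    ++ [','] ++ PySem.Int.toChars ds ++ ['_'] ++ PySem.Int.toChars de ++ ['d','e','l'] ++ cur
    ++ [','] ++ PySem.Int.toChars frs ++ ['_'] ++ PySem.Int.toChars fre ++ ['i','n','s'] ++ cur ++ [']'])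

def pvARecMM (u off s i insC delC : Int) (oc rc : Char) : String :=
  let mu := PySem.Int.mod (i - insC + off) u + 1
  let mp := (i + 1) - insC
  let mr := i + s - delC
  String.ofList (['['] ++ PySem.Int.toChars mu ++ [oc, '>', rc]
    ++ [','] ++ PySem.Int.toChars mp ++ [oc, '>', rc]
    ++ [','] ++ PySem.Int.toChars mr ++ [rc, '>', oc] ++ [']'])

-- the for-loop over range(len(optimal)) as structural recursion on the remaining
-- iteration count, with the same five loop variables; indexing o[i]/r[i] is in range
-- under Pre_ so getD is exact there
def pvALoop (oL rL : List Char) (u off s : Int) :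
    Nat → Nat → Int → Int → List Char → List Char → List String
  | 0, _, _, _, _, _ => []
  | fuel+1, i, insC, delC, curIns, curDel =>
    let oc := oL.getD i ' '
    let rc := rL.getD i ' '
    if oc = '-' then
      pvALoop oL rL u off s fuel (i+1) (insC+1) delC (curIns ++ [rc]) curDel
    else if rc = '-' then
      pvALoop oL rL u off s fuel (i+1) insC (delC+1) curIns (curDel ++ [oc])
    else
      (if curIns ≠ [] then [pvARecIns u off s (i:Int) insC delC curIns] else []) ++
      (if curDel ≠ [] then [pvARecDel u off s (i:Int) insC delC curDel] else []) ++
      (if rc ≠ oc then [pvARecMM u off s (i:Int) insC delC oc rc] else []) ++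
      pvALoop oL rL u off s fuel (i+1) insC delC [] []

def interpret_alignment (alignment_repeat_in_read : String) (alignment_optimal_repeat : String) (repeat_unit_offset : Int) (repeat_unit : String) (start_in_read : Int) (end_in_read : Int) : List String :=
  let oL := alignment_optimal_repeat.toList
  let rL := alignment_repeat_in_read.toList
  pvALoop oL rL (repeat_unit.toList.length : Int) repeat_unit_offset start_in_read oL.length 0 0 0 [] []

-- ===== PORT B =====
def pvDelCol (oL rL : List Char) (j : Nat) : Bool := oL.getD j ' ' != '-' && rL.getD j ' ' == '-'

-- ''.join generator over range(prev+1, i) with a filter, exact on nonnegative indices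
def pvGapIns (oL rL : List Char) (prev i : Int) : List Char :=
  ((PySem.List.pyRange (prev+1) i 1).filter (fun j => oL.getD j.toNat ' ' == '-')).map
    (fun j => rL.getD j.toNat ' ')

def pvGapDel (oL rL : List Char) (prev i : Int) : List Char :=
  ((PySem.List.pyRange (prev+1) i 1).filter (fun j => pvDelCol oL rL j.toNat)).map
    (fun j => oL.getD j.toNat ' ')

-- B's formatting helpers: unitpos, rng ("a_b") and rec ("[" + ",".join(fields) + "]")
def pvUnitpos (u off p : Int) : Int := PySem.Int.mod (p + off - 1) u + 1
def pvRng (a b : Int) : List Char := PySem.Int.toChars a ++ ['_'] ++ PySem.Int.toChars b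
def pvRec (fields : List (List Char)) : String :=
  String.ofList (['['] ++ List.intercalate [','] fields ++ [']'])

-- phase 1: the prefix-count tables ib/db (list appends ib.append(ib[-1] + ...),
-- ported as structural recursion on the loop counter; ib[-1] on the nonempty table is getLastD)
def pvBPrefix (oL rL : List Char) : Nat → List Int × List Int
  | 0 => ([0], [0])
  | j+1 =>
    let p := pvBPrefix oL rL j
    (p.1 ++ [p.1.getLastD 0 + (if oL.getD j ' ' = '-' then 1 else 0)],
     p.2 ++ [p.2.getLastD 0 + (if oL.getD j ' ' ≠ '-' ∧ rL.getD j ' ' = '-' then 1 else 0)])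

-- body of B's loop over the match columns; state = (prev, records); ib[i]/db[i] are in
-- range (0 ≤ i < len(o) < len(ib)), so getD is exact there
def pvBMatchStep (oL rL : List Char) (u off s : Int) (ib db : List Int)
    (st : Int × List String) (i : Nat) : Int × List String :=
  let I : Int := ib.getD i 0
  let D : Int := db.getD i 0
  let ins := pvGapIns oL rL st.1 (i:Int)
  let dele := pvGapDel oL rL st.1 (i:Int)
  ((i:Int),
   st.2 ++
    ((if ins ≠ [] then
        [pvRec [pvRng (pvUnitpos u off ((i:Int) - I)) (pvUnitpos u off ((i:Int) + 1 - I)) ++ ['i','n','s'] ++ ins,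
                pvRng ((i:Int) - I) ((i:Int) + 1 - I) ++ ['i','n','s'] ++ ins,
                pvRng (((i:Int) - D + s - 1) - (ins.length : Int) + 1) ((i:Int) - D + s - 1) ++ ['d','e','l'] ++ ins]]
      else []) ++
     (if dele ≠ [] then
        [pvRec [pvRng (pvUnitpos u off ((i:Int) - I - (dele.length : Int) + 1)) (pvUnitpos u off ((i:Int) - I)) ++ ['d','e','l'] ++ dele,
                pvRng ((i:Int) - I - (dele.length : Int) + 1) ((i:Int) - I) ++ ['d','e','l'] ++ dele,
                pvRng ((i:Int) - D + s - 1) ((i:Int) - D + s) ++ ['i','n','s'] ++ dele]]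
      else []) ++
     (if rL.getD i ' ' ≠ oL.getD i ' ' then
        [pvRec [PySem.Int.toChars (pvUnitpos u off ((i:Int) + 1 - I)) ++ [oL.getD i ' ', '>', rL.getD i ' '],
                PySem.Int.toChars ((i:Int) + 1 - I) ++ [oL.getD i ' ', '>', rL.getD i ' '],
                PySem.Int.toChars ((i:Int) + s - D) ++ [rL.getD i ' ', '>', oL.getD i ' ']]]
      else [])))

def interpret_alignment_alt (alignment_repeat_in_read : String) (alignment_optimal_repeat : String) (repeat_unit_offset : Int) (repeat_unit : String) (start_in_read : Int) (end_in_read : Int) : List String :=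
  let oL := alignment_optimal_repeat.toList
  let rL := alignment_repeat_in_read.toList
  let p := pvBPrefix oL rL oL.length
  let ms := (List.range oL.length).filter
    (fun i => oL.getD i ' ' != '-' && rL.getD i ' ' != '-')
  (ms.foldl (pvBMatchStep oL rL (repeat_unit.toList.length : Int) repeat_unit_offset start_in_read p.1 p.2) (-1, [])).2

-- ===== PRECONDITION & SPEC =====
-- Pre_ excludes the inputs where A raises: IndexError when the optimal-repeat string is
-- longer than the read string, and ZeroDivisionError from %len(repeat_unit) when
-- repeat_unit is empty; with an empty repeat_unit it also excludes the degenerate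
-- alignments that emit no record (where A happens to return []).
def Pre_interpret_alignment (alignment_repeat_in_read : String) (alignment_optimal_repeat : String) (repeat_unit_offset : Int) (repeat_unit : String) (start_in_read : Int) (end_in_read : Int) : Prop :=
  alignment_optimal_repeat.toList.length ≤ alignment_repeat_in_read.toList.length ∧
  repeat_unit.toList ≠ []
instance (alignment_repeat_in_read : String) (alignment_optimal_repeat : String) (repeat_unit_offset : Int) (repeat_unit : String) (start_in_read : Int) (end_in_read : Int) : Decidable (Pre_interpret_alignment alignment_repeat_in_read alignment_optimal_repeat repeat_unit_offset repeat_unit start_in_read end_in_read) := by unfold Pre_interpret_alignment; infer_instance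

def pvWitness_interpret_alignment : String × String × Int × String × Int × Int :=
  ("ACGGT", "ACG-T", 2, "ACG", 5, 9)

def Spec_interpret_alignment (alignment_repeat_in_read : String) (alignment_optimal_repeat : String) (repeat_unit_offset : Int) (repeat_unit : String) (start_in_read : Int) (end_in_read : Int) (out : List String) : Prop := out = interpret_alignment_alt alignment_repeat_in_read alignment_optimal_repeat repeat_unit_offset repeat_unit start_in_read end_in_read
instance (alignment_repeat_in_read : String) (alignment_optimal_repeat : String) (repeat_unit_offset : Int) (repeat_unit : String) (start_in_read : Int) (end_in_read : Int) (out : List String) : Decidable (Spec_interpret_alignment alignment_repeat_in_read alignment_optimal_repeat repeat_unit_offset repeat_unit start_in_read end_in_read out) := by unfold Spec_interpret_alignment; infer_instance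

-- ===== CLAIM (what is proved, stated in full; the proofs are below) =====
def Claim_equal_interpret_alignment : Prop := ∀ (alignment_repeat_in_read : String) (alignment_optimal_repeat : String) (repeat_unit_offset : Int) (repeat_unit : String) (start_in_read : Int) (end_in_read : Int), Dom_interpret_alignment alignment_repeat_in_read alignment_optimal_repeat repeat_unit_offset repeat_unit start_in_read end_in_read → Pre_interpret_alignment alignment_repeat_in_read alignment_optimal_repeat repeat_unit_offset repeat_unit start_in_read end_in_read → Spec_interpret_alignment alignment_repeat_in_read alignment_optimal_repeat repeat_unit_offset repeat_unit start_in_read end_in_read (interpret_alignment alignment_repeat_in_read alignment_optimal_repeat repeat_unit_offset repeat_unit start_in_read end_in_read)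

-- ===== LEMMAS AND PROOFS =====

lemma pvRec_three (a b c : List Char) :
    pvRec [a, b, c] = String.ofList (['['] ++ (a ++ [','] ++ b ++ [','] ++ c) ++ [']']) := by
  simp [pvRec, List.intercalate]

-- proof-only: the values A's running counters attain at column m
def pvInsCnt (oL : List Char) (m : Nat) : Int := ((oL.take m).count '-' : Int)
def pvDelCnt (oL rL : List Char) (m : Nat) : Int :=
  (((List.range m).filter (pvDelCol oL rL)).length : Int)

lemma pvBRecIns_eq (u off s i c d : Int) (cur : List Char) :
    pvRec [pvRng (pvUnitpos u off (i - c)) (pvUnitpos u off (i + 1 - c)) ++ ['i','n','s'] ++ cur,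
           pvRng (i - c) (i + 1 - c) ++ ['i','n','s'] ++ cur,
           pvRng ((i - d + s - 1) - (cur.length : Int) + 1) (i - d + s - 1) ++ ['d','e','l'] ++ cur]
      = pvARecIns u off s i c d cur := by
  rw [pvRec_three]
  simp only [pvARecIns, pvRng, pvUnitpos]
  have h1 : i + 1 - c - 1 = i - c := by ring
  have h2 : i - d + (s - 1) = i - d + s - 1 := by ring
  rw [h1, h2]
  simp [List.append_assoc]

lemma pvBRecDel_eq (u off s i c d : Int) (cur : List Char) :
    pvRec [pvRng (pvUnitpos u off (i - c - (cur.length : Int) + 1)) (pvUnitpos u off (i - c)) ++ ['d','e','l'] ++ cur,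
           pvRng (i - c - (cur.length : Int) + 1) (i - c) ++ ['d','e','l'] ++ cur,
           pvRng (i - d + s - 1) (i - d + s) ++ ['i','n','s'] ++ cur]
      = pvARecDel u off s i c d cur := by
  rw [pvRec_three]
  simp only [pvARecDel, pvRng, pvUnitpos]
  have h1 : (i + 1 : Int) - d + (s - 1) = i - d + s := by ring
  have h2 : (i + 1 : Int) - d + (s - 1) - 1 = i - d + s - 1 := by ring
  rw [h2, h1]
  simp [List.append_assoc]

lemma pvBRecMM_eq (u off s i c d : Int) (oc rc : Char) :
    pvRec [PySem.Int.toChars (pvUnitpos u off (i + 1 - c)) ++ [oc, '>', rc],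
           PySem.Int.toChars (i + 1 - c) ++ [oc, '>', rc],
           PySem.Int.toChars (i + s - d) ++ [rc, '>', oc]]
      = pvARecMM u off s i c d oc rc := by
  rw [pvRec_three]
  simp only [pvARecMM, pvUnitpos]
  have h1 : i + 1 - c + off - 1 = i - c + off := by ring
  rw [h1]
  simp [List.append_assoc]

lemma pvInsCnt_succ (oL : List Char) (m : Nat) :
    pvInsCnt oL (m+1) = pvInsCnt oL m + (if oL.getD m ' ' = '-' then 1 else 0) := by
  unfold pvInsCnt
  rw [List.take_add_one]
  by_cases hm : m < oL.length
  · rw [List.getElem?_eq_getElem hm]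
    have hg : oL.getD m ' ' = oL[m] := List.getD_eq_getElem oL ' ' hm
    rw [hg]
    simp only [Option.toList_some, List.count_append, List.count_cons, List.count_nil]
    push_cast
    split_ifs with h1 <;> simp_all
  · have h1 : oL[m]? = none := List.getElem?_eq_none (by omega)
    have h2 : oL.getD m ' ' = ' ' := by simp [List.getD_eq_getElem?_getD, h1]
    rw [h1, h2]
    simp

lemma pvDelCnt_succ (oL rL : List Char) (m : Nat) :
    pvDelCnt oL rL (m+1) = pvDelCnt oL rL m + (if pvDelCol oL rL m then 1 else 0) := by
  unfold pvDelCnt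
  rw [List.range_succ, List.filter_append]
  rw [List.filter_singleton]
  split_ifs with h1 <;> simp [h1]

lemma pvGapIns_succ (oL rL : List Char) (prev : Int) (m : Nat) (h : prev + 1 ≤ (m:Int)) :
    pvGapIns oL rL prev ((m:Int)+1)
      = pvGapIns oL rL prev m ++ (if oL.getD m ' ' = '-' then [rL.getD m ' '] else []) := by
  unfold pvGapIns
  rw [PySem.List.pyRange_one_succ_right h, List.filter_append, List.map_append]
  simp only [List.filter_singleton, Int.toNat_natCast]
  cases h1 : (oL.getD m ' ' == '-') <;> simp_all [beq_iff_eq, Int.toNat_natCast]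

lemma pvGapDel_succ (oL rL : List Char) (prev : Int) (m : Nat) (h : prev + 1 ≤ (m:Int)) :
    pvGapDel oL rL prev ((m:Int)+1)
      = pvGapDel oL rL prev m ++ (if pvDelCol oL rL m then [oL.getD m ' '] else []) := by
  unfold pvGapDel
  rw [PySem.List.pyRange_one_succ_right h, List.filter_append, List.map_append]
  simp only [List.filter_singleton, Int.toNat_natCast]
  cases h1 : pvDelCol oL rL m <;> simp_all [Int.toNat_natCast]

lemma pvGapIns_empty (oL rL : List Char) (i : Int) : pvGapIns oL rL (i-1) i = [] := by
  unfold pvGapIns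
  rw [PySem.List.pyRange_one_eq_nil (by omega)]
  simp

lemma pvGapDel_empty (oL rL : List Char) (i : Int) : pvGapDel oL rL (i-1) i = [] := by
  unfold pvGapDel
  rw [PySem.List.pyRange_one_eq_nil (by omega)]
  simp

lemma pvBPrefix_spec (oL rL : List Char) (j : Nat) :
    pvBPrefix oL rL j = ((List.range (j+1)).map (fun m => pvInsCnt oL m),
                         (List.range (j+1)).map (fun m => pvDelCnt oL rL m)) := by
  induction j with
  | zero => simp [pvBPrefix, pvInsCnt, pvDelCnt]
  | succ j ih =>
    rw [pvBPrefix, ih]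
    have hr1 : List.range (j+1+1) = List.range (j+1) ++ [j+1] := List.range_succ
    have hr0 : List.range (j+1) = List.range j ++ [j] := List.range_succ
    have hd : (if oL.getD j ' ' ≠ '-' ∧ rL.getD j ' ' = '-' then (1:Int) else 0)
        = (if pvDelCol oL rL j then (1:Int) else 0) := by
      unfold pvDelCol
      split_ifs with h1 h2 <;> simp_all [bne_iff_ne]
    simp only [hd, hr1]
    rw [List.map_append, List.map_append]
    congr 1
    · congr 1
      rw [hr0, List.map_append]
      simp [pvInsCnt_succ oL j]
    · congr 1
      rw [hr0, List.map_append]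
      simp [pvDelCnt_succ oL rL j]

lemma pvTableGet (f : Nat → Int) (n k : Nat) (h : k < n + 1) :
    ((List.range (n+1)).map f).getD k 0 = f k := by
  rw [List.getD_eq_getElem _ _ (by simpa using h)]
  simp

lemma pvMain (oL rL : List Char) (u off s : Int) (ib db : List Int) :
    ∀ (fuel m : Nat) (prev : Int) (out : List String),
      (∀ k : Nat, k < m + fuel → ib.getD k 0 = pvInsCnt oL k) →
      (∀ k : Nat, k < m + fuel → db.getD k 0 = pvDelCnt oL rL k) →
      prev + 1 ≤ (m:Int) → 0 ≤ prev + 1 →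
      (((List.range' m fuel).filter
          (fun i => oL.getD i ' ' != '-' && rL.getD i ' ' != '-')).foldl
        (pvBMatchStep oL rL u off s ib db) (prev, out)).2
      = out ++ pvALoop oL rL u off s fuel m
          (pvInsCnt oL m) (pvDelCnt oL rL m)
          (pvGapIns oL rL prev (m:Int)) (pvGapDel oL rL prev (m:Int)) := by
  intro fuel
  induction fuel with
  | zero =>
    intro m prev out hib hdb h1 h2
    simp [pvALoop]
  | succ fuel ih =>
    intro m prev out hib hdb h1 h2
    rw [List.range'_succ, List.filter_cons]
    have e1 := pvInsCnt_succ oL m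
    have e2 := pvDelCnt_succ oL rL m
    have e3 := pvGapIns_succ oL rL prev m h1
    have e4 := pvGapDel_succ oL rL prev m h1
    have hc : ((m+1 : Nat) : Int) = (m:Int) + 1 := by push_cast; ring
    by_cases ho : oL.getD m ' ' = '-'
    · -- insertion column: dropped from B's match list, accumulated by A
      have hcond : (oL.getD m ' ' != '-' && rL.getD m ' ' != '-') = false := by
        rw [ho]; simp
      rw [hcond, if_neg (by simp)]
      have hdc : pvDelCol oL rL m = false := by
        unfold pvDelCol; rw [ho]; simp
      rw [if_pos ho] at e1 e3
      simp only [hdc] at e2 e4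
      simp only [Bool.false_eq_true, if_false, add_zero, List.append_nil] at e2 e4
      rw [ih (m+1) prev out (fun k hk => hib k (by omega)) (fun k hk => hdb k (by omega))
            (by rw [hc]; omega) h2]
      rw [hc, e1, e2, e3, e4]
      conv_rhs => rw [pvALoop]
      have ho' : oL[m]?.getD ' ' = '-' := ho
      simp [ho']
    · by_cases hr : rL.getD m ' ' = '-'
      · -- deletion column
        have ho' : ¬oL[m]?.getD ' ' = '-' := ho
        have hr' : rL[m]?.getD ' ' = '-' := hr
        have hcond : (oL.getD m ' ' != '-' && rL.getD m ' ' != '-') = false := by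
          rw [hr]; simp
        rw [hcond, if_neg (by simp)]
        have hdc : pvDelCol oL rL m = true := by
          unfold pvDelCol; rw [hr]; simpa [bne_iff_ne] using ho
        rw [if_neg ho] at e1 e3
        simp only [add_zero, List.append_nil] at e1 e3
        simp only [hdc, if_true] at e2 e4
        rw [ih (m+1) prev out (fun k hk => hib k (by omega)) (fun k hk => hdb k (by omega))
              (by rw [hc]; omega) h2]
        rw [hc, e1, e2, e3, e4]
        conv_rhs => rw [pvALoop]
        simp [ho', hr']
      · -- match/mismatch column
        have ho' : ¬oL[m]?.getD ' ' = '-' := ho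
        have hr' : ¬rL[m]?.getD ' ' = '-' := hr
        have hcond : (oL.getD m ' ' != '-' && rL.getD m ' ' != '-') = true := by
          simp [bne_iff_ne, ho', hr']
        rw [hcond, if_pos rfl]
        rw [List.foldl_cons]
        have hstep : pvBMatchStep oL rL u off s ib db (prev, out) m =
            ((m:Int), out ++
              ((if pvGapIns oL rL prev (m:Int) ≠ [] then [pvARecIns u off s (m:Int) (pvInsCnt oL m) (pvDelCnt oL rL m) (pvGapIns oL rL prev (m:Int))] else []) ++
               (if pvGapDel oL rL prev (m:Int) ≠ [] then [pvARecDel u off s (m:Int) (pvInsCnt oL m) (pvDelCnt oL rL m) (pvGapDel oL rL prev (m:Int))] else []) ++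
               (if rL.getD m ' ' ≠ oL.getD m ' ' then [pvARecMM u off s (m:Int) (pvInsCnt oL m) (pvDelCnt oL rL m) (oL.getD m ' ') (rL.getD m ' ')] else []))) := by
          simp only [pvBMatchStep, hib m (by omega), hdb m (by omega),
            pvBRecIns_eq, pvBRecDel_eq, pvBRecMM_eq]
        rw [hstep]
        have hdc : pvDelCol oL rL m = false := by
          unfold pvDelCol; simp [hr']
        rw [if_neg ho] at e1
        simp only [add_zero] at e1
        simp only [hdc] at e2
        simp only [Bool.false_eq_true, if_false, add_zero] at e2
        have g3 : pvGapIns oL rL (m:Int) ((m+1 : Nat):Int) = [] := by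
          rw [hc]; have h := pvGapIns_empty oL rL ((m:Int)+1); simpa using h
        have g4 : pvGapDel oL rL (m:Int) ((m+1 : Nat):Int) = [] := by
          rw [hc]; have h := pvGapDel_empty oL rL ((m:Int)+1); simpa using h
        rw [ih (m+1) (m:Int) _ (fun k hk => hib k (by omega)) (fun k hk => hdb k (by omega))
              (by rw [hc]) (by omega)]
        rw [e1, e2, g3, g4]
        conv_rhs => rw [pvALoop]
        simp [ho', hr', List.append_assoc]

theorem interpret_alignment_spec : Claim_equal_interpret_alignment := by
  intro r o off unit s e _hDom _hPre
  unfold Spec_interpret_alignment interpret_alignment interpret_alignment_alt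
  dsimp only
  rw [List.range_eq_range']
  have g1 : pvGapIns o.toList r.toList (-1) ((0:Nat):Int) = [] := by
    unfold pvGapIns; rw [PySem.List.pyRange_one_eq_nil (by norm_num)]; simp
  have g2 : pvGapDel o.toList r.toList (-1) ((0:Nat):Int) = [] := by
    unfold pvGapDel; rw [PySem.List.pyRange_one_eq_nil (by norm_num)]; simp
  rw [pvBPrefix_spec o.toList r.toList o.toList.length]
  rw [pvMain o.toList r.toList (unit.toList.length : Int) _ _ _ _ o.toList.length 0 (-1) []
      (fun k hk => pvTableGet _ _ _ (by omega)) (fun k hk => pvTableGet _ _ _ (by omega))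
      (by norm_num) (by norm_num)]
  rw [g1, g2]
  simp [pvInsCnt, pvDelCnt]
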